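-- pv_equiv track=rewrite | github.com/liwb27/leetcode | 220. Contains Duplicate III.py | containsNearbyAlmostDuplicate2
-- ===== SOURCE A (Python) =====
-- def containsNearbyAlmostDuplicate2(nums, k, t):
--     """
--     :type nums: List[int]
--     :type k: int
--     :type t: int
--     :rtype: bool
--     """
--
--     data = []
--     for idx,val in enumerate(nums):
--         data.append((idx,val))
--     data.sort(key=lambda s: s[1]) # 排序
--
--     for i in range(len(data)-1): # 遍历所有
--         j = 1
--         while data[i+j][1] -data[i][1] <= t: # 只检查差值小于t的
--             if abs(data[i+j][0] -data[i][0]) <= k: # 检查idx间距是否满足要求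
--                 return True
--             j += 1
--             if i+j >= len(data):
--                 break
--     return False
-- ===== SOURCE B (Python) =====
-- def containsNearbyAlmostDuplicate2(nums, k, t):
--     """
--     :type nums: List[int]
--     :type k: int
--     :type t: int
--     :rtype: bool
--     """
--     n = len(nums)
--     for q in range(n):
--         lo = q - k
--         if lo < 0:
--             lo = 0
--         for p in range(lo, q):
--             if abs(nums[q] - nums[p]) <= t:
--                 return True
--     return False
-- ===== Notes on version B (the rewrite author's own statement) =====
-- stated objective: faster
-- what changed: A sorts (index,value) pairs by value and, for each sorted position, scans forward over every later element whose value gap stays within t; B drops the sort entirely and does one direct pass over indices, comparing each element only with the at most k preceding elements.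
import Mathlib
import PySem

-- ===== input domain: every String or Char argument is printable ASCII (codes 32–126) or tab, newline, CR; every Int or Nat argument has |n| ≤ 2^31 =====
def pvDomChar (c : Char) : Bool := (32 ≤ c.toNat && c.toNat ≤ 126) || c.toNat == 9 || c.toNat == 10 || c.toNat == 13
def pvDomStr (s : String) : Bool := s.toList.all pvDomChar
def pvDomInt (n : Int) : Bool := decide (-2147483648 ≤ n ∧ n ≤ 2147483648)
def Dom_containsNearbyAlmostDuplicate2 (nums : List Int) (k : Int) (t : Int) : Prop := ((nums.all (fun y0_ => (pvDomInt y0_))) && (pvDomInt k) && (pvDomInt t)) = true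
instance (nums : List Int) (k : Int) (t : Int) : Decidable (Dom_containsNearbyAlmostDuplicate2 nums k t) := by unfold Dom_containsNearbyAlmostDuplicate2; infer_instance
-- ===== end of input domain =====

-- B replaces A's sort-by-value plus expanding value-window scan with a direct single pass over
-- index windows (each index q is compared with the at most k previous indices); objective: simpler.

-- ===== PORT A =====
-- A's inner 'while' loop: j keeps increasing while the value difference stays ≤ t;
-- the range check here plays the role of A's 'if i+j >= len(data): break'
def pvWhileA (d : List (Int × Int)) (k t : Int) (i j : Nat) : Bool :=
  if i + j < d.length then
    if (d.getD (i + j) (0, 0)).2 - (d.getD i (0, 0)).2 ≤ t then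
      if |(d.getD (i + j) (0, 0)).1 - (d.getD i (0, 0)).1| ≤ k then true
      else pvWhileA d k t i (j + 1)
    else false
  else false
termination_by d.length - (i + j)
decreasing_by omega

def containsNearbyAlmostDuplicate2 (nums : List Int) (k : Int) (t : Int) : Bool :=
  -- data = []; for idx,val in enumerate(nums): data.append((idx,val))
  let data := (PySem.List.enumerate nums 0).foldl (fun acc p => acc ++ [p]) []
  -- data.sort(key=lambda s: s[1])
  let d := PySem.List.sorted data (fun s => s.2) false
  -- for i in range(len(data)-1): <inner while loop>; return False
  (PySem.List.pyRange 0 (PySem.List.len d - 1) 1).any (fun i => pvWhileA d k t i.toNat 1)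

-- ===== PORT B =====
def containsNearbyAlmostDuplicate2_alt (nums : List Int) (k : Int) (t : Int) : Bool :=
  (PySem.List.pyRange 0 (PySem.List.len nums) 1).any (fun q =>
    let lo := if q - k < 0 then 0 else q - k
    (PySem.List.pyRange lo q 1).any (fun p =>
      decide (|PySem.List.pyGetD nums q 0 - PySem.List.pyGetD nums p 0| ≤ t)))

-- ===== PRECONDITION & SPEC =====
def Spec_containsNearbyAlmostDuplicate2 (nums : List Int) (k : Int) (t : Int) (out : Bool) : Prop := out = containsNearbyAlmostDuplicate2_alt nums k t
instance (nums : List Int) (k : Int) (t : Int) (out : Bool) : Decidable (Spec_containsNearbyAlmostDuplicate2 nums k t out) := by unfold Spec_containsNearbyAlmostDuplicate2; infer_instance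

-- ===== CLAIM (what is proved, stated in full; the proofs are below) =====
def Claim_equal_containsNearbyAlmostDuplicate2 : Prop := ∀ (nums : List Int) (k : Int) (t : Int), Dom_containsNearbyAlmostDuplicate2 nums k t → Spec_containsNearbyAlmostDuplicate2 nums k t (containsNearbyAlmostDuplicate2 nums k t)

-- ===== LEMMAS AND PROOFS =====

-- the common characterization of both programs: some pair of positions p < q at index
-- distance ≤ k holds values within t of each other
def pvPairP (nums : List Int) (k t : Int) : Prop :=
  ∃ p q : Nat, q < nums.length ∧ p < q ∧ (q : Int) - (p : Int) ≤ k ∧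
    |nums.getD q 0 - nums.getD p 0| ≤ t

lemma pvB_iff (nums : List Int) (k t : Int) :
    containsNearbyAlmostDuplicate2_alt nums k t = true ↔ pvPairP nums k t := by
  unfold containsNearbyAlmostDuplicate2_alt pvPairP
  simp only [List.any_eq_true, PySem.List.mem_pyRange_one, decide_eq_true_eq, PySem.List.len_eq]
  constructor
  · rintro ⟨q, ⟨hq0, hqn⟩, p, ⟨hp1, hp2⟩, habs⟩
    have hp0 : 0 ≤ p := by split_ifs at hp1 <;> omega
    have hpk : q - p ≤ k := by split_ifs at hp1 <;> omega
    refine ⟨p.toNat, q.toNat, by omega, by omega, by omega, ?_⟩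
    rw [PySem.List.pyGetD_of_nonneg nums 0 hq0, PySem.List.pyGetD_of_nonneg nums 0 hp0] at habs
    exact habs
  · rintro ⟨p, q, hq, hpq, hk, habs⟩
    refine ⟨(q : Int), ⟨by omega, by omega⟩, (p : Int), ⟨?_, by omega⟩, ?_⟩
    · split_ifs <;> omega
    · rw [PySem.List.pyGetD_of_nonneg nums 0 (by omega : (0:Int) ≤ (q:Int)),
          PySem.List.pyGetD_of_nonneg nums 0 (by omega : (0:Int) ≤ (p:Int))]
      simpa using habs

-- values in a by-value-sorted list are monotone in the position
lemma pvSorted_getD_le (d : List (Int × Int)) (hs : d.Pairwise (fun a b => a.2 ≤ b.2))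
    {a b : Nat} (hab : a < b) (hb : b < d.length) :
    (d.getD a (0, 0)).2 ≤ (d.getD b (0, 0)).2 := by
  have ha : a < d.length := lt_trans hab hb
  rw [List.getD_eq_getElem d _ ha, List.getD_eq_getElem d _ hb]
  exact List.pairwise_iff_getElem.mp hs a b ha hb hab

-- the inner while loop of A succeeds iff some partner at or beyond offset j is within t in
-- value and within k in original index (sortedness makes the early exit of the loop complete)
lemma pvWhileA_iff (d : List (Int × Int)) (hs : d.Pairwise (fun a b => a.2 ≤ b.2))
    (k t : Int) (i j : Nat) :
    pvWhileA d k t i j = true ↔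
      ∃ m : Nat, j ≤ m ∧ i + m < d.length ∧
        (d.getD (i + m) (0, 0)).2 - (d.getD i (0, 0)).2 ≤ t ∧
        |(d.getD (i + m) (0, 0)).1 - (d.getD i (0, 0)).1| ≤ k := by
  generalize hn : d.length - (i + j) = n
  induction n generalizing j with
  | zero =>
    rw [pvWhileA]
    simp only [if_neg (by omega : ¬ i + j < d.length)]
    constructor
    · intro h; exact absurd h (by simp)
    · rintro ⟨m, hjm, hm, -, -⟩; omega
  | succ n ih =>
    rw [pvWhileA]
    by_cases hlen : i + j < d.length
    · rw [if_pos hlen]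
      by_cases hval : (d.getD (i + j) (0, 0)).2 - (d.getD i (0, 0)).2 ≤ t
      · rw [if_pos hval]
        by_cases hidx : |(d.getD (i + j) (0, 0)).1 - (d.getD i (0, 0)).1| ≤ k
        · rw [if_pos hidx]
          constructor
          · intro _; exact ⟨j, le_refl j, hlen, hval, hidx⟩
          · intro _; rfl
        · rw [if_neg hidx]
          rw [ih (j + 1) (by omega)]
          constructor
          · rintro ⟨m, hm1, hm2, hm3, hm4⟩; exact ⟨m, by omega, hm2, hm3, hm4⟩
          · rintro ⟨m, hm1, hm2, hm3, hm4⟩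
            refine ⟨m, ?_, hm2, hm3, hm4⟩
            rcases Nat.eq_or_lt_of_le hm1 with h | h
            · exact absurd (h ▸ hm4) hidx
            · omega
      · rw [if_neg hval]
        constructor
        · intro h; exact absurd h (by simp)
        · rintro ⟨m, hm1, hm2, hm3, -⟩
          rcases Nat.eq_or_lt_of_le hm1 with h | h
          · exact absurd (h ▸ hm3) hval
          · -- j < m : value at i+j ≤ value at i+m, contradiction with hval
            have : (d.getD (i + j) (0, 0)).2 ≤ (d.getD (i + m) (0, 0)).2 :=
              pvSorted_getD_le d hs (by omega) hm2
            omega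
    · rw [if_neg hlen]
      constructor
      · intro h; exact absurd h (by simp)
      · rintro ⟨m, hm1, hm2, -, -⟩; omega

-- A returns true iff the by-value-sorted list d has a position pair a < b with
-- value difference ≤ t and original-index distance ≤ k
def pvQ (d : List (Int × Int)) (k t : Int) : Prop :=
  ∃ a b : Nat, a < b ∧ b < d.length ∧
    (d.getD b (0, 0)).2 - (d.getD a (0, 0)).2 ≤ t ∧
    |(d.getD b (0, 0)).1 - (d.getD a (0, 0)).1| ≤ k

lemma pvA_iff (nums : List Int) (k t : Int) :
    containsNearbyAlmostDuplicate2 nums k t = true ↔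
      pvQ (PySem.List.sorted (PySem.List.enumerate nums 0) (fun s => s.2) false) k t := by
  unfold containsNearbyAlmostDuplicate2
  rw [PySem.List.foldl_append_singleton, List.nil_append]
  have hs : (PySem.List.sorted (PySem.List.enumerate nums 0) (fun s => s.2) false).Pairwise
      (fun a b => a.2 ≤ b.2) := PySem.List.sorted_pairwise _ _
  simp only [List.any_eq_true, PySem.List.mem_pyRange_one, PySem.List.len_eq]
  constructor
  · rintro ⟨i, ⟨hi0, hi1⟩, hw⟩
    rw [pvWhileA_iff _ hs k t i.toNat 1] at hw
    obtain ⟨m, hm1, hm2, hm3, hm4⟩ := hw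
    exact ⟨i.toNat, i.toNat + m, by omega, hm2, hm3, hm4⟩
  · rintro ⟨a, b, hab, hb, hv, hk⟩
    refine ⟨(a : Int), ⟨by omega, by omega⟩, ?_⟩
    simp only [Int.toNat_natCast]
    rw [pvWhileA_iff _ hs k t a 1]
    exact ⟨b - a, by omega, by omega, by rwa [Nat.add_sub_cancel' (le_of_lt hab)],
      by rwa [Nat.add_sub_cancel' (le_of_lt hab)]⟩

lemma pvEnum_nodup (nums : List Int) : (PySem.List.enumerate nums 0).Nodup :=
  (PySem.List.pairwise_lt_enumerate nums 0).imp
    (fun h heq => by rw [heq] at h; exact lt_irrefl _ h)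

-- transport pairs of positions in the sorted list back to pairs of original indices
lemma pvQ_iff_P (nums : List Int) (k t : Int) :
    pvQ (PySem.List.sorted (PySem.List.enumerate nums 0) (fun s => s.2) false) k t ↔
      pvPairP nums k t := by
  have hperm := PySem.List.sorted_perm (PySem.List.enumerate nums 0) (fun s => s.2) false
  have hs : (PySem.List.sorted (PySem.List.enumerate nums 0) (fun s => s.2) false).Pairwise
      (fun a b => a.2 ≤ b.2) := PySem.List.sorted_pairwise _ _
  set d := PySem.List.sorted (PySem.List.enumerate nums 0) (fun s => s.2) false with hd
  have hnd : d.Nodup := (hperm.nodup_iff).mpr (pvEnum_nodup nums)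
  constructor
  · rintro ⟨a, b, hab, hb, hv, hk⟩
    have ha : a < d.length := lt_trans hab hb
    rw [List.getD_eq_getElem d _ ha, List.getD_eq_getElem d _ hb] at hv hk
    have hmono : d[a].2 ≤ d[b].2 := List.pairwise_iff_getElem.mp hs a b ha hb hab
    have hne : d[a] ≠ d[b] := List.pairwise_iff_getElem.mp hnd a b ha hb hab
    have hu : d[a] ∈ PySem.List.enumerate nums 0 := hperm.mem_iff.mp (List.getElem_mem ha)
    have hv' : d[b] ∈ PySem.List.enumerate nums 0 := hperm.mem_iff.mp (List.getElem_mem hb)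
    rw [PySem.List.mem_enumerate_iff] at hu hv'
    obtain ⟨ku, hku, hue⟩ := hu
    obtain ⟨kv, hkv, hve⟩ := hv'
    rw [zero_add] at hue hve
    have hkne : ku ≠ kv := by
      intro h; apply hne; rw [hue, hve]; subst h; rfl
    have hk' := abs_le.mp hk
    rw [hue, hve] at hv hk' hmono
    simp only at hv hk' hmono
    rcases Nat.lt_or_ge ku kv with h | h
    · refine ⟨ku, kv, hkv, h, by omega, ?_⟩
      rw [List.getD_eq_getElem nums _ hkv, List.getD_eq_getElem nums _ hku]
      exact abs_le.mpr ⟨by omega, by omega⟩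
    · have h' : kv < ku := by omega
      refine ⟨kv, ku, hku, h', by omega, ?_⟩
      rw [List.getD_eq_getElem nums _ hku, List.getD_eq_getElem nums _ hkv]
      exact abs_le.mpr ⟨by omega, by omega⟩
  · rintro ⟨p, q, hq, hpq, hk, habs⟩
    have hp : p < nums.length := lt_trans hpq hq
    rw [List.getD_eq_getElem nums _ hq, List.getD_eq_getElem nums _ hp] at habs
    have habs' := abs_le.mp habs
    have hu : ((p : Int), nums[p]) ∈ d := by
      rw [hperm.mem_iff, PySem.List.mem_enumerate_iff]
      exact ⟨p, hp, by rw [zero_add]⟩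
    have hv : ((q : Int), nums[q]) ∈ d := by
      rw [hperm.mem_iff, PySem.List.mem_enumerate_iff]
      exact ⟨q, hq, by rw [zero_add]⟩
    obtain ⟨a, ha, hae⟩ := List.mem_iff_getElem.mp hu
    obtain ⟨b, hb, hbe⟩ := List.mem_iff_getElem.mp hv
    have hab : a ≠ b := by
      intro h
      have hdd : d[a] = d[b] := by subst h; rfl
      rw [hae, hbe] at hdd
      have := congrArg Prod.fst hdd
      simp only at this
      omega
    rcases Nat.lt_or_ge a b with h | h
    · have hmono : d[a].2 ≤ d[b].2 := List.pairwise_iff_getElem.mp hs a b ha hb h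
      rw [hae, hbe] at hmono
      simp only at hmono
      refine ⟨a, b, h, hb, ?_, ?_⟩
      · rw [List.getD_eq_getElem d _ hb, List.getD_eq_getElem d _ ha, hae, hbe]
        simp only
        omega
      · rw [List.getD_eq_getElem d _ hb, List.getD_eq_getElem d _ ha, hae, hbe]
        simp only
        exact abs_le.mpr ⟨by omega, by omega⟩
    · have h' : b < a := by omega
      have hmono : d[b].2 ≤ d[a].2 := List.pairwise_iff_getElem.mp hs b a hb ha h'
      rw [hae, hbe] at hmono
      simp only at hmono
      refine ⟨b, a, h', ha, ?_, ?_⟩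
      · rw [List.getD_eq_getElem d _ hb, List.getD_eq_getElem d _ ha, hae, hbe]
        simp only
        omega
      · rw [List.getD_eq_getElem d _ hb, List.getD_eq_getElem d _ ha, hae, hbe]
        simp only
        exact abs_le.mpr ⟨by omega, by omega⟩

-- ===== VERDICT (by name: the statement is the Claim_ definition above) =====
theorem containsNearbyAlmostDuplicate2_spec : Claim_equal_containsNearbyAlmostDuplicate2 := by
  intro nums k t _
  unfold Spec_containsNearbyAlmostDuplicate2
  exact Bool.coe_iff_coe.mp
    (((pvA_iff nums k t).trans (pvQ_iff_P nums k t)).trans (pvB_iff nums k t).symm)
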